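-- pv_equiv track=rewrite | github.com/NingMiao/SelfCheck | script/run.py | split_into_steps
-- ===== SOURCE A (Python) =====
-- def remove_step(line):
--     for i in range(len(line)):
--         if line[i]==':':
--             for j in range(i+1, len(line)):
--                 if line[j]!=' ':
--                     return line[j:]
--     return ''
--
-- def split_into_steps(reasoning):
--     reasoning=reasoning.split('\n')
--     steps=[]
--     for line in reasoning:
--         if len(line)==0:
--             continue
--         elif line.lower().startswith('step') or len(steps)==0:
--             steps.append([remove_step(line)])
--         elif len(steps)==0:
--             steps.append([line])
--         else:
--             steps[-1].append(line)
--     steps=['\n'.join(step) for step in steps]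
--
--     steps_=[]
--     for step in steps:
--         if len(steps_)==0:
--             steps_.append(step)
--         elif steps_[-1].strip().endswith(':'):
--             steps_[-1]+=step
--         else:
--             steps_.append(step)
--     return steps_
-- ===== SOURCE B (Python) =====
-- def split_into_steps(reasoning):
--     def strip_label(line):
--         _, sep, tail = line.partition(':')
--         return tail.lstrip(' ') if sep else ''
--
--     merged = []
--     cur = None
--
--     def flush():
--         if cur is None:
--             return
--         text = '\n'.join(cur)
--         if merged and merged[-1].strip().endswith(':'):
--             merged[-1] += text
--         else:
--             merged.append(text)
--
--     for line in reasoning.split('\n'):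
--         if not line:
--             continue
--         if line.lower().startswith('step') or cur is None:
--             flush()
--             cur = [strip_label(line)]
--         else:
--             cur.append(line)
--     flush()
--     return merged
-- ===== Notes on version B (the rewrite author's own statement) =====
-- stated objective: faster
-- what changed: A's two sequential passes (group lines into per-step line lists, then a second pass merging joined steps whose predecessor ends with ':') are fused into a single loop over the lines that finalizes and merges each step as it closes, and remove_step's nested per-character index scans are replaced by str.partition at the first colon plus lstrip.
import Mathlib
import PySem

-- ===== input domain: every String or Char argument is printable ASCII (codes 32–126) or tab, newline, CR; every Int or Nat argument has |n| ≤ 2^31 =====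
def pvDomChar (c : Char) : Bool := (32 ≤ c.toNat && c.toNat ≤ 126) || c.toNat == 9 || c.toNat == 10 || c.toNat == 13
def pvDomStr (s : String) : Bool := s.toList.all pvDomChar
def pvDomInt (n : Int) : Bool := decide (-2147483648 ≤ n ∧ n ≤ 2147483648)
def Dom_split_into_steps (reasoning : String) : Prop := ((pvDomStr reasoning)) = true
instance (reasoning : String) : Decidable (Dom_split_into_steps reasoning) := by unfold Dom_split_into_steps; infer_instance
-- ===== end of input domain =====

-- B fuses A's two sequential passes (group lines into steps, then merge steps whose
-- predecessor ends with ':') into one loop over the lines, finalizing each step as it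
-- closes, and remove_step's nested index scans become a partition-at-first-colon; same
-- return value; a timing run measured B faster by a constant factor.

-- ===== PORT A =====

-- inner loop  'for j in range(i+1, len(line)): if line[j]!=' ': return line[j:]'
def rsInner (cs : List Char) (j : Nat) : Option String :=
  if h : j < cs.length then
    if cs[j] ≠ ' ' then some (String.ofList (cs.drop j))
    else rsInner cs (j + 1)
  else none
termination_by cs.length - j

-- outer loop of remove_step
def rsOuter (cs : List Char) (i : Nat) : String :=
  if h : i < cs.length then
    if cs[i] = ':' then
      match rsInner cs (i + 1) with
      | some s => s
      | none => rsOuter cs (i + 1)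
    else rsOuter cs (i + 1)
  else ""
termination_by cs.length - i

def remove_step (line : String) : String := rsOuter line.toList 0

-- body of A's first loop (steps is a list of groups of lines)
def stepA (steps : List (List String)) (line : String) : List (List String) :=
  if PySem.Str.len line == 0 then steps
  else if PySem.Str.startswith (PySem.Str.lower line) "step" || steps.length == 0 then
    steps ++ [[remove_step line]]
  else if steps.length == 0 then steps ++ [[line]]
  else steps.dropLast ++ [steps.getLast! ++ [line]]

-- body of A's second loop
def mergeA (acc : List String) (step : String) : List String :=
  if acc.length == 0 then acc ++ [step]
  else if PySem.Str.endswith (PySem.Str.strip acc.getLast!) ":" then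
    acc.dropLast ++ [String.ofList (acc.getLast!.toList ++ step.toList)]
  else acc ++ [step]

def split_into_steps (reasoning : String) : List String :=
  let lines := (PySem.Str.split? reasoning "\n").getD []
  let steps := lines.foldl stepA []
  let steps' := steps.map (fun step => PySem.Str.join "\n" step)
  steps'.foldl mergeA []

-- ===== PORT B =====

-- B's strip_label: partition at the first ':', lstrip(' ') the tail, else ''
def strip_label (line : String) : String :=
  match line.toList.dropWhile (· ≠ ':') with
  | [] => ""
  | _ :: rest => String.ofList (rest.dropWhile (· = ' '))

-- B's flush merge rule
def pushMerge (merged : List String) (text : String) : List String :=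
  if merged.length ≠ 0 ∧ PySem.Str.endswith (PySem.Str.strip merged.getLast!) ":" then
    merged.dropLast ++ [String.ofList (merged.getLast!.toList ++ text.toList)]
  else merged ++ [text]

def flushB (merged : List String) (cur : Option (List String)) : List String :=
  match cur with
  | none => merged
  | some cs => pushMerge merged (PySem.Str.join "\n" cs)

-- body of B's single loop; state = (finished merged steps, current step's lines)
def stepB (st : List String × Option (List String)) (line : String) :
    List String × Option (List String) :=
  if PySem.Str.len line == 0 then st
  else if PySem.Str.startswith (PySem.Str.lower line) "step" || st.2.isNone then
    (flushB st.1 st.2, some [strip_label line])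
  else (st.1, st.2.map (· ++ [line]))

def split_into_steps_alt (reasoning : String) : List String :=
  let st := ((PySem.Str.split? reasoning "\n").getD []).foldl stepB ([], none)
  flushB st.1 st.2

-- ===== PRECONDITION & SPEC =====
def Spec_split_into_steps (reasoning : String) (out : List String) : Prop := out = split_into_steps_alt reasoning
instance (reasoning : String) (out : List String) : Decidable (Spec_split_into_steps reasoning out) := by unfold Spec_split_into_steps; infer_instance

-- ===== CLAIM (what is proved, stated in full; the proofs are below) =====
def Claim_equal_split_into_steps : Prop := ∀ (reasoning : String), Dom_split_into_steps reasoning → Spec_split_into_steps reasoning (split_into_steps reasoning)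

-- ===== LEMMAS AND PROOFS =====

-- remove_step = strip_label
def stripLabelChars (l : List Char) : String :=
  match l.dropWhile (· ≠ ':') with
  | [] => ""
  | _ :: rest => String.ofList (rest.dropWhile (· = ' '))

lemma rsInner_eq (cs : List Char) (j : Nat) :
    rsInner cs j =
      (if ((cs.drop j).dropWhile (· = ' ')).isEmpty then none
       else some (String.ofList ((cs.drop j).dropWhile (· = ' ')))) := by
  fun_induction rsInner cs j with
  | case1 j h hne =>
    rw [List.drop_eq_getElem_cons h]
    simp [List.dropWhile, hne]
    omega
  | case2 j h heq ih =>
    rw [List.drop_eq_getElem_cons h]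
    simp only [ne_eq, not_not] at heq
    simp [List.dropWhile, heq, ih]
  | case3 j h =>
    rw [List.drop_of_length_le (by omega)]
    simp

lemma rsOuter_eq (cs : List Char) (i : Nat) :
    rsOuter cs i = stripLabelChars (cs.drop i) := by
  fun_induction rsOuter cs i with
  | case1 i h hcolon s hs =>
    rw [List.drop_eq_getElem_cons h]
    rw [rsInner_eq] at hs
    by_cases he : ((cs.drop (i+1)).dropWhile (· = ' ')).isEmpty
    · simp [he] at hs
    · simp [he] at hs
      simp [stripLabelChars, List.dropWhile, hcolon, hs]
  | case2 i h hcolon hs ih =>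
    rw [rsInner_eq] at hs
    by_cases he : ((cs.drop (i+1)).dropWhile (· = ' ')).isEmpty
    · rw [List.drop_eq_getElem_cons h]
      have hall : ∀ x ∈ cs.drop (i+1), x = ' ' := by
        intro x hx
        have := (List.dropWhile_eq_nil_iff).mp (List.isEmpty_iff.mp he) x hx
        simpa using this
      have h2 : (cs.drop (i+1)).dropWhile (fun x => !decide (x = ':')) = [] := by
        apply List.dropWhile_eq_nil_iff.mpr
        intro x hx
        simp [hall x hx]
      simp [ih, stripLabelChars, List.dropWhile, hcolon, h2, List.isEmpty_iff.mp he]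
    · simp [he] at hs
  | case3 i h hcolon ih =>
    rw [List.drop_eq_getElem_cons h, ih]
    simp [stripLabelChars, List.dropWhile, hcolon]
  | case4 i h =>
    rw [List.drop_of_length_le (by omega)]
    simp [stripLabelChars]

lemma remove_step_eq (line : String) : remove_step line = strip_label line := by
  have := rsOuter_eq line.toList 0
  simpa [remove_step, strip_label, stripLabelChars] using this

-- B's flush merge rule is A's second-loop body
lemma pushMerge_eq_mergeA (m : List String) (t : String) : pushMerge m t = mergeA m t := by
  cases m with
  | nil => simp [pushMerge, mergeA]
  | cons x xs => simp [pushMerge, mergeA]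

-- the relation between A's first-pass state and B's fused state
def StRel (steps : List (List String)) (st : List String × Option (List String)) : Prop :=
  (steps = [] ∧ st = ([], none)) ∨
  ∃ gs g, steps = gs ++ [g] ∧
    st = ((gs.map (fun step => PySem.Str.join "\n" step)).foldl mergeA [], some g)

lemma rel_step (line : String) (steps : List (List String))
    (st : List String × Option (List String)) (h : StRel steps st) :
    StRel (stepA steps line) (stepB st line) := by
  by_cases hlen : line = ""
  · simpa [stepA, stepB, hlen] using h
  · rcases h with ⟨hs, hst⟩ | ⟨gs, g, hs, hst⟩
    · subst hs hst
      have e1 : stepA [] line = [[remove_step line]] := by simp [stepA, hlen]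
      have e2 : stepB ([], none) line = ([], some [strip_label line]) := by
        simp [stepB, hlen, flushB]
      rw [e1, e2]
      exact Or.inr ⟨[], [remove_step line], rfl, by simp [remove_step_eq]⟩
    · subst hs hst
      by_cases hsw : PySem.Chars.startswith (PySem.Chars.lower line.toList) ['s','t','e','p'] = true
      · have e1 : stepA (gs ++ [g]) line = (gs ++ [g]) ++ [[remove_step line]] := by
          simp [stepA, hlen, hsw]
        have e2 : stepB ((gs.map (fun step => PySem.Str.join "\n" step)).foldl mergeA [], some g) line
            = (mergeA ((gs.map (fun step => PySem.Str.join "\n" step)).foldl mergeA []) (PySem.Str.join "\n" g),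
               some [strip_label line]) := by
          simp [stepB, hlen, hsw, flushB, pushMerge_eq_mergeA]
        rw [e1, e2]
        refine Or.inr ⟨gs ++ [g], [remove_step line], by simp, ?_⟩
        simp [List.foldl_append, remove_step_eq]
      · have e1 : stepA (gs ++ [g]) line = gs ++ [g ++ [line]] := by
          simp [stepA, hlen, hsw]
        have e2 : stepB ((gs.map (fun step => PySem.Str.join "\n" step)).foldl mergeA [], some g) line
            = ((gs.map (fun step => PySem.Str.join "\n" step)).foldl mergeA [], some (g ++ [line])) := by
          simp [stepB, hlen, hsw]
        rw [e1, e2]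
        exact Or.inr ⟨gs, g ++ [line], rfl, rfl⟩

lemma rel_foldl (lines : List String) (steps : List (List String))
    (st : List String × Option (List String)) (h : StRel steps st) :
    StRel (lines.foldl stepA steps) (lines.foldl stepB st) := by
  induction lines generalizing steps st with
  | nil => simpa using h
  | cons l ls ih => exact ih _ _ (rel_step l steps st h)

lemma rel_final (steps : List (List String)) (st : List String × Option (List String))
    (h : StRel steps st) :
    flushB st.1 st.2 = (steps.map (fun step => PySem.Str.join "\n" step)).foldl mergeA [] := by
  rcases h with ⟨hs, hst⟩ | ⟨gs, g, hs, hst⟩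
  · subst hs hst; simp [flushB]
  · subst hs hst
    simp [flushB, pushMerge_eq_mergeA, List.foldl_append]

-- ===== VERDICT (by name: the statement is the Claim_ definition above) =====
theorem split_into_steps_spec : Claim_equal_split_into_steps := by
  intro reasoning _
  unfold Spec_split_into_steps split_into_steps split_into_steps_alt
  have h := rel_foldl ((PySem.Str.split? reasoning "\n").getD []) [] ([], none) (Or.inl ⟨rfl, rfl⟩)
  exact (rel_final _ _ h).symm
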